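-- pv_equiv track=rewrite | github.com/pandaeater-dotcom/AccessAlly-Assesment | time.py | runTime
-- ===== SOURCE A (Python) =====
-- def arithmeticSequence(hours, minutes):
--     '''
--     this function determines if a particular time is an arithmetic sequence
--
--     12:34
--     1: most significant hour (msh)
--     2: least significant hour
--     3: most significant minute
--     4: least significant minute
--     '''
--     msm = minutes//10
--     lsm = minutes % 10
--     msh = hours//10
--     lsh = hours % 10
--     if hours < 10 and lsm - msm == msm - lsh:
--         return True
--     elif hours >= 10 and lsm - msm == msm - lsh and msm - lsh == lsh - msh:
--         return True
--     return False
--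
-- def runTime(mins, hours=12, minutes=0, count=0):
--     cycles = mins//720
--     remainder = mins % 720
--     remainderCount = 0
--     if cycles > 0:
--         mins = 720
--     # split total mins into number of full 12hr 'cycles' and 'remainder'
--
--     for i in range(mins+1):
--         if arithmeticSequence(hours, minutes):
--             count += 1
--             if i <= remainder and cycles > 0:
--                 remainderCount += 1
--             # we are counting for the full cycle and the remainder simultaneously
--         if minutes == 59:
--             minutes = 0
--             if hours != 12:
--                 hours += 1
--             else:
--                 hours = 1
--         else:
--             minutes += 1
--
--     if cycles > 0:
--         count *= cycles
--     count += remainderCount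
--     return count
-- ===== SOURCE B (Python) =====
-- def arithmeticSequence(hours, minutes):
--     msm = minutes//10
--     lsm = minutes % 10
--     msh = hours//10
--     lsh = hours % 10
--     if hours < 10 and lsm - msm == msm - lsh:
--         return True
--     elif hours >= 10 and lsm - msm == msm - lsh and msm - lsh == lsh - msh:
--         return True
--     return False
--
-- def countArith(h, m, n):
--     # number of arithmetic-sequence times among the first n clock ticks from h:m
--     total = 0
--     while n > 0:
--         if arithmeticSequence(h, m):
--             total += 1
--         if m == 59:
--             h = 1 if h == 12 else h + 1
--             m = 0
--         else:
--             m += 1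
--         n -= 1
--     return total
--
-- def runTime(mins, hours=12, minutes=0, count=0):
--     if mins < 0:
--         return count
--     cycles, rem = divmod(mins, 720)
--     if cycles > 0:
--         return (count + countArith(hours, minutes, 721)) * cycles + countArith(hours, minutes, rem + 1)
--     return count + countArith(hours, minutes, mins + 1)
-- ===== Notes on version B (the rewrite author's own statement) =====
-- stated objective: simpler
-- what changed: Replaced A's single pass with two simultaneous counters, a mutated mins and a post-hoc multiply/add by a plain counting helper countArith(h,m,n) combined in a closed-form expression (count + pre-cycle)*cycles + pre-remainder, with explicit cases for negative mins, no cycles, and cycles>0.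
import Mathlib
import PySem

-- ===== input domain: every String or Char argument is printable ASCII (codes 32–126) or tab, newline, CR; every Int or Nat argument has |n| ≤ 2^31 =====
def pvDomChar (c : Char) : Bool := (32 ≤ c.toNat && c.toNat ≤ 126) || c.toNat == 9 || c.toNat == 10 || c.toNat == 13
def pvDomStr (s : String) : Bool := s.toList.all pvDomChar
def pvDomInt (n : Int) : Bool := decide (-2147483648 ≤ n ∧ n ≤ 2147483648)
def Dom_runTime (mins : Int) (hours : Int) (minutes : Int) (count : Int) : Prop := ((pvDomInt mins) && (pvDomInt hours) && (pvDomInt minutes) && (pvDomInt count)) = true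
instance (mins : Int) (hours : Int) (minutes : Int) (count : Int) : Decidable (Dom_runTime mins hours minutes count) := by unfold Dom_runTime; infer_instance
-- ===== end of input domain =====

-- B replaces A's single pass with two in-loop counters and post-hoc multiply by a
-- plain counting helper combined in a closed-form case expression (objective: simpler).

-- ===== PORT A =====
def arithmeticSequence (hours : Int) (minutes : Int) : Bool :=
  let msm := PySem.Int.floordiv minutes 10
  let lsm := PySem.Int.mod minutes 10
  let msh := PySem.Int.floordiv hours 10
  let lsh := PySem.Int.mod hours 10
  if hours < 10 ∧ lsm - msm = msm - lsh then true
  else if hours ≥ 10 ∧ lsm - msm = msm - lsh ∧ msm - lsh = lsh - msh then true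
  else false

-- the body of A's for-loop, state (hours, minutes, count, remainderCount)
def loopBody (remainder : Int) (cycles : Int) (s : Int × Int × Int × Int) (i : Int) :
    Int × Int × Int × Int :=
  let c := if arithmeticSequence s.1 s.2.1 then s.2.2.1 + 1 else s.2.2.1
  let r := if arithmeticSequence s.1 s.2.1 ∧ i ≤ remainder ∧ cycles > 0 then s.2.2.2 + 1 else s.2.2.2
  if s.2.1 = 59 then
    (if s.1 ≠ 12 then (s.1 + 1, 0, c, r) else (1, 0, c, r))
  else (s.1, s.2.1 + 1, c, r)

def runTime (mins : Int) (hours : Int) (minutes : Int) (count : Int) : Int :=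
  let cycles := PySem.Int.floordiv mins 720
  let remainder := PySem.Int.mod mins 720
  let mins1 := if cycles > 0 then (720 : Int) else mins
  let st := (PySem.List.pyRange 0 (mins1 + 1) 1).foldl (loopBody remainder cycles)
    (hours, minutes, count, 0)
  let c2 := if cycles > 0 then st.2.2.1 * cycles else st.2.2.1
  c2 + st.2.2.2

-- ===== PORT B =====
-- countArith's n is a down-counted loop bound, nonnegative at every call site, so Nat
def countArith (h : Int) (m : Int) : Nat → Int
  | 0 => 0
  | n + 1 =>
    let inc : Int := if arithmeticSequence h m then 1 else 0
    if m = 59 then inc + countArith (if h = 12 then 1 else h + 1) 0 n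
    else inc + countArith h (m + 1) n

def runTime_alt (mins : Int) (hours : Int) (minutes : Int) (count : Int) : Int :=
  if mins < 0 then count
  else
    let cycles := PySem.Int.floordiv mins 720
    let rem := PySem.Int.mod mins 720
    if cycles > 0 then
      (count + countArith hours minutes 721) * cycles + countArith hours minutes (rem + 1).toNat
    else
      count + countArith hours minutes (mins + 1).toNat

-- ===== PRECONDITION & SPEC =====
def Spec_runTime (mins : Int) (hours : Int) (minutes : Int) (count : Int) (out : Int) : Prop := out = runTime_alt mins hours minutes count
instance (mins : Int) (hours : Int) (minutes : Int) (count : Int) (out : Int) : Decidable (Spec_runTime mins hours minutes count out) := by unfold Spec_runTime; infer_instance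

-- ===== CLAIM (what is proved, stated in full; the proofs are below) =====
def Claim_equal_runTime : Prop := ∀ (mins : Int) (hours : Int) (minutes : Int) (count : Int), Dom_runTime mins hours minutes count → Spec_runTime mins hours minutes count (runTime mins hours minutes count)

-- ===== LEMMAS AND PROOFS =====

-- one clock tick
def step (s : Int × Int) : Int × Int :=
  if s.2 = 59 then (if s.1 = 12 then 1 else s.1 + 1, 0) else (s.1, s.2 + 1)

-- what A's remainderCount accumulates, starting at index a
def rcnt (rem : Int) (cycles : Int) (a : Int) (h : Int) (m : Int) : Nat → Int
  | 0 => 0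
  | n + 1 =>
    (if arithmeticSequence h m ∧ a ≤ rem ∧ cycles > 0 then 1 else 0)
      + rcnt rem cycles (a + 1) (step (h, m)).1 (step (h, m)).2 n

theorem countArith_succ (h m : Int) (n : Nat) :
    countArith h m (n + 1) =
      (if arithmeticSequence h m then (1 : Int) else 0)
        + countArith (step (h, m)).1 (step (h, m)).2 n := by
  by_cases hm : m = 59 <;> simp [countArith, step, hm]

theorem loop_eq (rem cycles : Int) (n : Nat) :
    ∀ (a h m c r : Int),
      (PySem.List.pyRange a (a + n) 1).foldl (loopBody rem cycles) (h, m, c, r)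
        = ((step^[n] (h, m)).1, (step^[n] (h, m)).2,
           c + countArith h m n, r + rcnt rem cycles a h m n) := by
  induction n with
  | zero =>
    intro a h m c r
    rw [show a + ((0:Nat):Int) = a by omega, PySem.List.pyRange_one_eq_nil le_rfl]
    simp [countArith, rcnt]
  | succ n ih =>
    intro a h m c r
    rw [PySem.List.pyRange_one_cons (by push_cast; omega : a < a + ((n : Nat) + 1 : Nat))]
    have harg : a + ((n : Nat) + 1 : Nat) = (a + 1) + (n : Nat) := by push_cast; ring
    rw [List.foldl_cons, harg]
    have hbody : loopBody rem cycles (h, m, c, r) a =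
        ((step (h, m)).1, (step (h, m)).2,
         c + (if arithmeticSequence h m then (1:Int) else 0),
         r + (if arithmeticSequence h m ∧ a ≤ rem ∧ cycles > 0 then (1:Int) else 0)) := by
      by_cases hm : m = 59 <;> by_cases hh : h = 12 <;>
        simp [loopBody, step, hm, hh] <;> split_ifs <;> ring_nf <;> simp
    rw [hbody, ih]
    rw [countArith_succ, Function.iterate_succ_apply, rcnt]
    ring_nf

theorem rcnt_zero_of_not_pos (rem cycles : Int) (hc : ¬ cycles > 0) (n : Nat) :
    ∀ (a h m : Int), rcnt rem cycles a h m n = 0 := by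
  induction n with
  | zero => intro a h m; rfl
  | succ n ih => intro a h m; simp [rcnt, hc, ih]

theorem rcnt_eq_countArith (rem cycles : Int) (hc : cycles > 0) (n : Nat) :
    ∀ (a h m : Int), rcnt rem cycles a h m n = countArith h m (min n (rem - a + 1).toNat) := by
  induction n with
  | zero => intro a h m; simp [rcnt, countArith]
  | succ n ih =>
    intro a h m
    by_cases ha : a ≤ rem
    · have h1 : (rem - a + 1).toNat = (rem - (a + 1) + 1).toNat + 1 := by omega
      have h2 : min (n + 1) ((rem - (a + 1) + 1).toNat + 1)
          = min n ((rem - (a + 1) + 1).toNat) + 1 := by omega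
      rw [rcnt, ih, h1, h2, countArith_succ]
      simp [hc, ha]
    · have h1 : (rem - a + 1).toNat = 0 := by omega
      have h2 : (rem - (a + 1) + 1).toNat = 0 := by omega
      rw [rcnt, ih, h1, h2]
      simp [ha, countArith]

theorem cycles_pos_iff (mins : Int) : PySem.Int.floordiv mins 720 > 0 ↔ 720 ≤ mins := by
  have := PySem.Int.le_floordiv_iff_mul_le (a := mins) (b := 720) (q := 1) (by omega)
  omega

-- ===== VERDICT (by name: the statement is the Claim_ definition above) =====
theorem runTime_spec : Claim_equal_runTime := by
  intro mins hours minutes count _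
  show runTime mins hours minutes count = runTime_alt mins hours minutes count
  unfold runTime runTime_alt
  by_cases hc : PySem.Int.floordiv mins 720 > 0
  · have hm720 : 720 ≤ mins := (cycles_pos_iff mins).1 hc
    have hrem0 : 0 ≤ PySem.Int.mod mins 720 := PySem.Int.mod_nonneg mins (by omega)
    have hremlt : PySem.Int.mod mins 720 < 720 := PySem.Int.mod_lt mins (by omega)
    simp only [hc, if_pos, if_neg (by omega : ¬ mins < 0)]
    have h721 : (720 : Int) + 1 = ((0:Int) + (721 : Nat)) := by norm_num
    rw [h721, loop_eq]
    rw [rcnt_eq_countArith _ _ hc]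
    have hmin : min (721 : Nat) (PySem.Int.mod mins 720 - 0 + 1).toNat
        = (PySem.Int.mod mins 720 + 1).toNat := by omega
    rw [hmin]
    ring_nf
  · by_cases hneg : mins < 0
    · have hnil : PySem.List.pyRange 0 (mins + 1) 1 = [] :=
        PySem.List.pyRange_one_eq_nil (by omega)
      rw [if_pos hneg]
      simp only [if_neg hc, hnil, List.foldl_nil]
      ring
    · rw [if_neg hneg]
      simp only [if_neg hc]
      have hn : mins + 1 = ((0:Int) + ((mins + 1).toNat : Nat)) := by omega
      conv_lhs => rw [hn]
      rw [loop_eq, rcnt_zero_of_not_pos _ _ hc]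
      ring_nf
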